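-- pv_equiv track=rewrite | github.com/kazisohrabuddintitu/ATS_MCP | graph_functions.py | build_adjacency_graph
-- ===== SOURCE A (Python) =====
-- from collections import defaultdict, deque
--
-- def build_adjacency_graph(graph_data):
--     """
--     Build an adjacency list from the graph data.
--     Components are connected if they share a wire.
--     """
--     adjacency = defaultdict(set)
--
--     wire_components = defaultdict(set)
--     for conn in graph_data.get("connections", []):
--         wire_components[conn["wire"]].add(conn["component"])
--
--     for _, components in wire_components.items():
--         components_list = list(components)
--         for i, comp1 in enumerate(components_list):
--             for comp2 in components_list[i + 1:]:
--                 adjacency[comp1].add(comp2)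
--                 adjacency[comp2].add(comp1)
--
--     return adjacency
-- ===== SOURCE B (Python) =====
-- def build_adjacency_graph(graph_data):
--     """
--     Build an adjacency list from the graph data.
--     Components are connected if they share a wire.
--     """
--     wire_components = {}
--     for conn in graph_data.get("connections", []):
--         wire_components.setdefault(conn["wire"], set()).add(conn["component"])
--
--     # Inverted index: component -> list of its shared wires (wires with >= 2 components).
--     comp_wires = {}
--     for wire, comps in wire_components.items():
--         if len(comps) > 1:
--             for comp in comps:
--                 comp_wires.setdefault(comp, []).append(wire)
--
--     # Each component's neighbourhood is assembled once, from its own wire list.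
--     adjacency = {}
--     for comp, wires in comp_wires.items():
--         nbrs = set()
--         for w in wires:
--             nbrs |= wire_components[w] - {comp}
--         adjacency[comp] = nbrs
--     return adjacency
-- ===== Notes on version B (the rewrite author's own statement) =====
-- stated objective: alternative
-- what changed: Replaces A's per-wire pairwise i<j double loop that mutates a shared defaultdict edge by edge with an inverted index (component -> its shared wires): each component's full neighbourhood is then assembled once by unioning its wires' component sets minus itself, and assigned to the dict in one shot.
import Mathlib
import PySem

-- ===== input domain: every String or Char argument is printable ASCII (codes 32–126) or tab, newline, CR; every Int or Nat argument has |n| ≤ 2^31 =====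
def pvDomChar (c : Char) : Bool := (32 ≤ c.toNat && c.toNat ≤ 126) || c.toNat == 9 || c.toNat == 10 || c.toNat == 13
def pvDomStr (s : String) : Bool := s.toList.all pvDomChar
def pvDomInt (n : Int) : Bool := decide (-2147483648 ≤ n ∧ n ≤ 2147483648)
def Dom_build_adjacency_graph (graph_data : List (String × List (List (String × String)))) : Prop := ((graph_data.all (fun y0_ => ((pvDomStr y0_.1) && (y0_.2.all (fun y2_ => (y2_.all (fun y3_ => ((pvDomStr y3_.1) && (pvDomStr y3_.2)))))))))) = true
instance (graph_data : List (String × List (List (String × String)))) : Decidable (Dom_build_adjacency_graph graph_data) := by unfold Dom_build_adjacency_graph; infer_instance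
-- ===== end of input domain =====

-- B replaces A's per-wire pairwise double loop (mutating one shared adjacency dict edge by edge)
-- with an inverted index component -> shared wires, from which each component's neighbourhood is
-- assembled once and assigned in one shot (objective: alternative).
-- Both programs raise KeyError when a connection lacks a "wire"/"component" key; Pre_ excludes those.

-- ===== PORT A =====
-- conn["wire"] / conn["component"]: KeyError is excluded by Pre_build_adjacency_graph, so the
-- total `getD _ ""` form agrees with Python's d[k] on every admitted input.
def build_adjacency_graph (graph_data : List (String × List (List (String × String)))) : List (String × List String) :=
  -- graph_data.get("connections", [])
  let connections := (PySem.Dict.mk graph_data).getD "connections" []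
  -- wire_components[conn["wire"]].add(conn["component"])   (defaultdict(set))
  let wire_components : PySem.Dict String (PySem.Set String) :=
    connections.foldl
      (fun d conn =>
        d.modify ((PySem.Dict.mk conn).getD "wire" "") []
          (fun s => s.add ((PySem.Dict.mk conn).getD "component" "")))
      PySem.Dict.empty
  -- for _, components in wire_components.items(): for i, comp1 in enumerate(components_list):
  --   for comp2 in components_list[i+1:]: adjacency[comp1].add(comp2); adjacency[comp2].add(comp1)
  let adjacency : PySem.Dict String (PySem.Set String) :=
    wire_components.items.foldl
      (fun adj item =>
        let components_list := item.2        -- list(components)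
        (PySem.List.enumerate components_list).foldl
          (fun adj p =>
            (PySem.List.slice components_list (some (p.1 + 1))).foldl
              (fun adj comp2 =>
                (adj.modify p.2 [] (fun s => s.add comp2)).modify comp2 [] (fun s => s.add p.2))
              adj)
          adj)
      PySem.Dict.empty
  adjacency.items

-- ===== PORT B =====
def build_adjacency_graph_alt (graph_data : List (String × List (List (String × String)))) : List (String × List String) :=
  let connections := (PySem.Dict.mk graph_data).getD "connections" []
  -- wire_components.setdefault(conn["wire"], set()).add(conn["component"])
  let wire_components : PySem.Dict String (PySem.Set String) :=
    connections.foldl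
      (fun d conn =>
        d.modify ((PySem.Dict.mk conn).getD "wire" "") []
          (fun s => s.add ((PySem.Dict.mk conn).getD "component" "")))
      PySem.Dict.empty
  -- inverted index: for wire, comps in wire_components.items(): if len(comps) > 1:
  --   for comp in comps: comp_wires.setdefault(comp, []).append(wire)
  let comp_wires : PySem.Dict String (List String) :=
    wire_components.items.foldl
      (fun d item =>
        if 1 < item.2.length then
          item.2.foldl (fun d comp => d.modify comp [] (fun l => l ++ [item.1])) d
        else d)
      PySem.Dict.empty
  -- for comp, wires in comp_wires.items(): nbrs = set(); for w in wires:
  --   nbrs |= wire_components[w] - {comp};  adjacency[comp] = nbrs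
  -- (wire_components[w] never raises here: every wire in comp_wires is a key; ported as getD _ [])
  let adjacency : PySem.Dict String (PySem.Set String) :=
    comp_wires.items.foldl
      (fun adj item =>
        adj.insert item.1
          (item.2.foldl
            (fun nbrs w => PySem.Set.union nbrs (PySem.Set.diff (wire_components.getD w []) [item.1]))
            PySem.Set.empty))
      PySem.Dict.empty
  adjacency.items

-- ===== PRECONDITION & SPEC =====
-- Pre_ excludes exactly the inputs on which Python's conn["wire"] / conn["component"] raises
-- KeyError (a connection dict missing one of the two keys); both A and B raise there.
def Pre_build_adjacency_graph (graph_data : List (String × List (List (String × String)))) : Prop :=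
  ∀ conn ∈ (PySem.Dict.mk graph_data).getD "connections" ([] : List (List (String × String))),
    (PySem.Dict.mk conn).contains "wire" = true ∧ (PySem.Dict.mk conn).contains "component" = true
instance (graph_data : List (String × List (List (String × String)))) : Decidable (Pre_build_adjacency_graph graph_data) := by unfold Pre_build_adjacency_graph; infer_instance

def pvWitness_build_adjacency_graph : (List (String × List (List (String × String)))) :=
  [("connections",
    [[("wire", "w1"), ("component", "R1")],
     [("wire", "w1"), ("component", "C1")],
     [("wire", "w2"), ("component", "C1")],
     [("wire", "w2"), ("component", "U1")],
     [("wire", "w3"), ("component", "R9")]])]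

def Spec_build_adjacency_graph (graph_data : List (String × List (List (String × String)))) (out : List (String × List String)) : Prop := out = build_adjacency_graph_alt graph_data
instance (graph_data : List (String × List (List (String × String)))) (out : List (String × List String)) : Decidable (Spec_build_adjacency_graph graph_data out) := by unfold Spec_build_adjacency_graph; infer_instance

-- ===== CLAIM (what is proved, stated in full; the proofs are below) =====
def Claim_equal_build_adjacency_graph : Prop := ∀ (graph_data : List (String × List (List (String × String)))), Dom_build_adjacency_graph graph_data → Pre_build_adjacency_graph graph_data → Spec_build_adjacency_graph graph_data (build_adjacency_graph graph_data)

-- ===== LEMMAS AND PROOFS =====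

-- ---------- A-side: the pairwise double loop over one wire's component list ----------

def pvPairInner (c : String) (r : List String) (adj : PySem.Dict String (PySem.Set String)) :
    PySem.Dict String (PySem.Set String) :=
  r.foldl (fun a x => (a.modify c [] (fun s => s.add x)).modify x [] (fun s => s.add c)) adj

def pvPairRec : List String → PySem.Dict String (PySem.Set String) → PySem.Dict String (PySem.Set String)
  | [], adj => adj
  | c :: r, adj => pvPairRec r (pvPairInner c r adj)

theorem pv_update_nil (s : PySem.Set String) : PySem.Set.update s [] = s := rfl
theorem pv_update_cons (s : PySem.Set String) (x : String) (t : List String) :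
    PySem.Set.update s (x :: t) = PySem.Set.update (PySem.Set.add s x) t := rfl
theorem pv_union_eq_update (s t : PySem.Set String) : PySem.Set.union s t = PySem.Set.update s t := rfl

theorem pv_set_contains_iff (s : PySem.Set String) (x : String) :
    PySem.Set.contains s x = true ↔ x ∈ s := by
  simp [PySem.Set.contains]

theorem pv_keys_modify_add {ν : Type} (d : PySem.Dict String ν) (k : String) (d0 : ν) (f : ν → ν) :
    (d.modify k d0 f).keys = PySem.Set.add d.keys k := by
  rw [PySem.Dict.keys_modify]
  by_cases h : d.contains k = true
  · rw [PySem.Dict.keys_insert_of_contains _ _ h, PySem.Set.add, if_pos]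
    exact (pv_set_contains_iff _ _).mpr ((PySem.Dict.contains_iff_mem_keys d k).mp h)
  · rw [PySem.Dict.keys_insert_of_not_contains _ _ (by simpa using h), PySem.Set.add, if_neg]
    intro hc
    exact h ((PySem.Dict.contains_iff_mem_keys d k).mpr ((pv_set_contains_iff _ _).mp hc))

theorem pv_update_absorb (s : PySem.Set String) (l : List String) (h : ∀ x ∈ l, x ∈ s) :
    PySem.Set.update s l = s := by
  induction l generalizing s with
  | nil => rfl
  | cons x t ih =>
    have hx : PySem.Set.add s x = s := PySem.Set.add_of_mem (h x (by simp))
    show PySem.Set.update (PySem.Set.add s x) t = s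
    rw [hx]
    exact ih s (fun y hy => h y (by simp [hy]))

theorem pv_inner_getD (c : String) (r : List String) (adj : PySem.Dict String (PySem.Set String))
    (hc : c ∉ r) (hr : r.Nodup) (k : String) :
    (pvPairInner c r adj).getD k [] =
      if k = c then PySem.Set.update (adj.getD c []) r
      else if k ∈ r then PySem.Set.add (adj.getD k []) c
      else adj.getD k [] := by
  induction r generalizing adj with
  | nil =>
    simp only [pvPairInner, List.foldl_nil, pv_update_nil, List.not_mem_nil, if_false]
    split_ifs with h
    · rw [h]
    · rfl
  | cons x r' ih =>
    have hcx : c ≠ x := by simp at hc; tauto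
    have hcr' : c ∉ r' := by simp at hc; tauto
    have hxr' : x ∉ r' := by simp at hr; tauto
    have hr' : r'.Nodup := by simp at hr; tauto
    have h2 : ∀ j, ((adj.modify c [] (fun s => s.add x)).modify x [] (fun s => s.add c)).getD j [] =
        if j = x then PySem.Set.add (adj.getD x []) c
        else if j = c then PySem.Set.add (adj.getD c []) x
        else adj.getD j [] := by
      intro j
      simp only [PySem.Dict.getD_modify]
      split_ifs <;> simp_all
    show (pvPairInner c r' ((adj.modify c [] (fun s => s.add x)).modify x [] (fun s => s.add c))).getD k [] = _
    rw [ih _ hcr' hr', h2 c, h2 k]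
    by_cases hkc : k = c <;> by_cases hkx : k = x <;> by_cases hkr : k ∈ r' <;>
      simp_all

theorem pv_inner_keys (c : String) (r : List String) (adj : PySem.Dict String (PySem.Set String)) :
    (pvPairInner c r adj).keys =
      if r = [] then adj.keys else PySem.Set.update (PySem.Set.add adj.keys c) r := by
  induction r generalizing adj with
  | nil => simp [pvPairInner]
  | cons x r' ih =>
    rw [if_neg (List.cons_ne_nil x r')]
    have hk2 : ((adj.modify c [] (fun s => s.add x)).modify x [] (fun s => s.add c)).keys =
        PySem.Set.add (PySem.Set.add adj.keys c) x := by
      rw [pv_keys_modify_add, pv_keys_modify_add]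
    show (pvPairInner c r' ((adj.modify c [] (fun s => s.add x)).modify x [] (fun s => s.add c))).keys = _
    rw [ih]
    by_cases hr' : r' = []
    · subst hr'
      rw [if_pos rfl, hk2, pv_update_cons, pv_update_nil]
    · rw [if_neg hr', hk2, pv_update_cons]
      have habs : PySem.Set.add (PySem.Set.add (PySem.Set.add adj.keys c) x) c
           = PySem.Set.add (PySem.Set.add adj.keys c) x :=
        PySem.Set.add_of_mem (by rw [PySem.Set.mem_add]; left; rw [PySem.Set.mem_add]; right; rfl)
      show PySem.Set.update (PySem.Set.add (PySem.Set.add (PySem.Set.add adj.keys c) x) c) r' = _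
      rw [habs]

theorem pv_diff_singleton (S : List String) (k : String) :
    PySem.Set.diff S [k] = S.filter (fun x => !(x == k)) := by
  simp only [PySem.Set.diff, PySem.Set.contains]
  apply List.filter_congr
  intro x _
  cases h : x == k <;> simp_all

theorem pv_filter_ne_self (r : List String) (c : String) (hc : c ∉ r) :
    r.filter (fun x => !(x == c)) = r :=
  List.filter_eq_self.mpr (fun a ha => by simp; exact fun h => hc (h ▸ ha))

theorem pv_pair_getD (S : List String) (adj : PySem.Dict String (PySem.Set String))
    (hS : S.Nodup) (k : String) :
    (pvPairRec S adj).getD k [] =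
      if k ∈ S then PySem.Set.update (adj.getD k []) (S.filter (fun x => !(x == k)))
      else adj.getD k [] := by
  induction S generalizing adj with
  | nil => simp [pvPairRec]
  | cons c r ih =>
    have hcr : c ∉ r := by simp at hS; tauto
    have hr : r.Nodup := by simp at hS; tauto
    show (pvPairRec r (pvPairInner c r adj)).getD k [] = _
    rw [ih (pvPairInner c r adj) hr]
    by_cases hkc : k = c
    · subst hkc
      rw [if_neg hcr, pv_inner_getD k r adj hcr hr, if_pos rfl, if_pos List.mem_cons_self,
        List.filter_cons, if_neg (by simp), pv_filter_ne_self r k hcr]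
    · by_cases hkr : k ∈ r
      · rw [if_pos hkr, if_pos (List.mem_cons_of_mem c hkr), pv_inner_getD c r adj hcr hr,
          if_neg hkc, if_pos hkr, List.filter_cons, if_pos (by simp [Ne.symm hkc]), pv_update_cons]
      · rw [if_neg hkr, if_neg (by simp [hkc, hkr]), pv_inner_getD c r adj hcr hr,
          if_neg hkc, if_neg hkr]

theorem pv_pair_keys (S : List String) (adj : PySem.Dict String (PySem.Set String))
    (hS : S.Nodup) :
    (pvPairRec S adj).keys = if 1 < S.length then PySem.Set.update adj.keys S else adj.keys := by
  induction S generalizing adj with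
  | nil => simp [pvPairRec]
  | cons c r ih =>
    have hr : r.Nodup := by simp at hS; tauto
    show (pvPairRec r (pvPairInner c r adj)).keys = _
    cases r with
    | nil => simp [pvPairRec, pvPairInner]
    | cons x r' =>
      rw [ih _ hr, pv_inner_keys, if_neg (List.cons_ne_nil x r'),
        if_pos (show 1 < (c::x::r').length by simp only [List.length_cons]; omega)]
      cases r' with
      | nil => rw [if_neg (by simp)]; rfl
      | cons y t =>
        rw [if_pos (show 1 < (x::y::t).length by simp only [List.length_cons]; omega),
          pv_update_absorb _ _ (fun z hz => (PySem.Set.mem_update _ _ _).mpr (Or.inr hz))]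
        rfl

-- A's enumerate/slice loop over one wire IS pvPairRec
theorem pv_enumerate_eq (xs : List String) (s : Int) :
    PySem.List.enumerate xs s = (xs.zipIdx 0).map (fun p => (s + (p.2 : Int), p.1)) := by
  induction xs generalizing s with
  | nil => simp [PySem.List.enumerate]
  | cons x t ih =>
    rw [show PySem.List.enumerate (x :: t) s = (s, x) :: PySem.List.enumerate t (s + 1) from rfl,
      ih (s + 1), List.zipIdx_cons, List.map_cons]
    congr 1
    · simp
    · rw [List.zipIdx_succ, List.map_map]
      apply List.map_congr_left
      rintro ⟨a, i⟩ _
      simp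
      ring

theorem pv_Aloop_eq (S : List String) (adj : PySem.Dict String (PySem.Set String)) :
    (PySem.List.enumerate S).foldl
      (fun adj p =>
        (PySem.List.slice S (some (p.1 + 1))).foldl
          (fun adj comp2 =>
            (adj.modify p.2 [] (fun s => s.add comp2)).modify comp2 [] (fun s => s.add p.2))
          adj)
      adj
    = pvPairRec S adj := by
  rw [pv_enumerate_eq S 0, List.foldl_map]
  have hslice : ∀ (i : Nat), PySem.List.slice S (some ((0 : Int) + (i : Int) + 1)) = S.drop (i + 1) := by
    intro i
    rw [PySem.List.slice_from S (by omega)]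
    congr 1
    omega
  simp only [hslice]
  induction S generalizing adj with
  | nil => rfl
  | cons c r ih =>
    rw [List.zipIdx_cons, List.foldl_cons]
    show (r.zipIdx 1).foldl _ (pvPairInner c r adj) = _
    rw [List.zipIdx_succ, List.foldl_map]
    show (r.zipIdx 0).foldl
      (fun adj p => ((c :: r).drop (p.2 + 1 + 1)).foldl
        (fun adj comp2 =>
          (adj.modify p.1 [] (fun s => s.add comp2)).modify comp2 [] (fun s => s.add p.1)) adj)
      (pvPairInner c r adj) = pvPairRec r (pvPairInner c r adj)
    rw [PySem.List.foldl_congr_mem _ _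
      (fun adj p => (r.drop (p.2 + 1)).foldl
        (fun adj comp2 =>
          (adj.modify p.1 [] (fun s => s.add comp2)).modify comp2 [] (fun s => s.add p.1)) adj) _
      (fun acc x _ => by rw [List.drop_succ_cons])]
    exact ih (pvPairInner c r adj)
      (fun i => by rw [PySem.List.slice_from r (by omega)]; congr 1; omega)

-- ---------- shared: the key-list fold and its Nodup ----------

theorem pv_keysfold_nodup (L : List (String × PySem.Set String)) (ks : PySem.Set String)
    (h : ks.Nodup) :
    (L.foldl (fun ks p => if 1 < p.2.length then PySem.Set.update ks p.2 else ks) ks).Nodup := by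
  induction L generalizing ks with
  | nil => exact h
  | cons p t ih =>
    rw [List.foldl_cons]
    apply ih
    split_ifs
    · exact PySem.Set.nodup_update _ _ h
    · exact h

-- ---------- A-side: the whole fold over the wires, value and key views ----------

theorem pv_A_getD (L : List (String × PySem.Set String)) (adj : PySem.Dict String (PySem.Set String))
    (hv : ∀ p ∈ L, (p.2 : List String).Nodup) (k : String) :
    ((L.foldl (fun adj p => pvPairRec p.2 adj) adj)).getD k [] =
      L.foldl (fun s p => if k ∈ p.2 then PySem.Set.update s (p.2.filter (fun x => !(x == k))) else s)
        (adj.getD k []) := by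
  induction L generalizing adj with
  | nil => rfl
  | cons p t ih =>
    rw [List.foldl_cons, List.foldl_cons, ih _ (fun q hq => hv q (List.mem_cons_of_mem p hq)),
      pv_pair_getD p.2 adj (hv p List.mem_cons_self) k]

theorem pv_A_keys (L : List (String × PySem.Set String)) (adj : PySem.Dict String (PySem.Set String))
    (hv : ∀ p ∈ L, (p.2 : List String).Nodup) :
    ((L.foldl (fun adj p => pvPairRec p.2 adj) adj)).keys =
      L.foldl (fun ks p => if 1 < p.2.length then PySem.Set.update ks p.2 else ks) adj.keys := by
  induction L generalizing adj with
  | nil => rfl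
  | cons p t ih =>
    rw [List.foldl_cons, List.foldl_cons, ih _ (fun q hq => hv q (List.mem_cons_of_mem p hq)),
      pv_pair_keys p.2 adj (hv p List.mem_cons_self)]

-- ---------- B-side: the inverted index ----------

def pvWiresOf (L : List (String × PySem.Set String)) (k : String) : List String :=
  (L.filter (fun p => decide (1 < p.2.length) && PySem.Set.contains p.2 k)).map Prod.fst

theorem pv_CW_getD (L : List (String × PySem.Set String)) (d : PySem.Dict String (List String))
    (hv : ∀ p ∈ L, (p.2 : List String).Nodup) (k : String) :
    ((L.foldl
        (fun d item =>
          if 1 < item.2.length then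
            item.2.foldl (fun d comp => d.modify comp [] (fun l => l ++ [item.1])) d
          else d)
        d)).getD k [] = d.getD k [] ++ pvWiresOf L k := by
  induction L generalizing d with
  | nil => simp [pvWiresOf]
  | cons p t ih =>
    have hstep : ((if 1 < p.2.length then
          p.2.foldl (fun d comp => d.modify comp [] (fun l => l ++ [p.1])) d else d)).getD k [] =
        d.getD k [] ++ (if decide (1 < p.2.length) && PySem.Set.contains p.2 k then [p.1] else []) := by
      by_cases hl : 1 < p.2.length
      · rw [if_pos hl]
        have hmap : (p.2 : List String).foldl (fun d comp => d.modify comp [] (fun l => l ++ [p.1])) d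
            = ((p.2 : List String).map (fun c => (c, p.1))).foldl
                (fun d q => d.modify q.1 [] (fun l => l ++ [q.2])) d := by
          rw [List.foldl_map]
        rw [hmap, PySem.Dict.getD_foldl_modify_append]
        congr 1
        rw [List.filter_map]
        simp only [List.map_map]
        rw [show ((fun q : String × String => q.1 == k) ∘ fun c => (c, p.1)) = (fun c => c == k) from rfl,
          List.filter_beq]
        by_cases hm : k ∈ p.2
        · rw [List.count_eq_one_of_mem (hv p List.mem_cons_self) hm,
            if_pos (by simp [hl, hm])]
          rfl
        · rw [List.count_eq_zero.mpr hm,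
            if_neg (by simp; intro _; exact hm)]
          rfl
      · rw [if_neg hl, if_neg (by simp [hl])]
        simp
    rw [List.foldl_cons, ih _ (fun q hq => hv q (List.mem_cons_of_mem p hq)), hstep]
    unfold pvWiresOf
    rw [List.filter_cons]
    by_cases hc : (decide (1 < p.2.length) && PySem.Set.contains p.2 k) = true
    · rw [if_pos hc, if_pos hc, List.map_cons, List.append_assoc]
      rfl
    · rw [if_neg hc, if_neg hc, List.append_nil]

theorem pv_CW_keys (L : List (String × PySem.Set String)) (d : PySem.Dict String (List String)) :
    ((L.foldl
        (fun d item =>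
          if 1 < item.2.length then
            item.2.foldl (fun d comp => d.modify comp [] (fun l => l ++ [item.1])) d
          else d)
        d)).keys =
      L.foldl (fun ks p => if 1 < p.2.length then PySem.Set.update ks p.2 else ks) d.keys := by
  induction L generalizing d with
  | nil => rfl
  | cons p t ih =>
    rw [List.foldl_cons, List.foldl_cons, ih]
    by_cases hl : 1 < p.2.length
    · rw [if_pos hl, if_pos hl, PySem.Dict.keys_foldl_modify]
    · rw [if_neg hl, if_neg hl]

-- B's neighbourhood-by-wires fold equals A's per-wire update fold, for every component k
theorem pv_nb_eq (W : PySem.Dict String (PySem.Set String)) (hW : W.keys.Nodup)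
    (hv : ∀ p ∈ W.items, (p.2 : List String).Nodup) (k : String) :
    (pvWiresOf W.items k).foldl
        (fun nbrs w => PySem.Set.union nbrs (PySem.Set.diff (W.getD w []) [k])) PySem.Set.empty =
      W.items.foldl
        (fun s p => if k ∈ p.2 then PySem.Set.update s (p.2.filter (fun x => !(x == k))) else s)
        [] := by
  unfold pvWiresOf
  rw [List.foldl_map, List.foldl_filter]
  apply PySem.List.foldl_congr_mem
  intro s p hp
  obtain ⟨w, S⟩ := p
  have hgd : W.getD w [] = S := PySem.Dict.getD_of_mem_items W hp hW ([] : PySem.Set String)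
  have hnd : (S : List String).Nodup := hv (w, S) hp
  by_cases hm : k ∈ S
  · by_cases hl : 1 < (S : List String).length
    · rw [if_pos (by simp [hl, hm]), if_pos hm, hgd,
        pv_diff_singleton, pv_union_eq_update]
    · have hS : S = [k] := by
        match S, hnd, hm, hl with
        | [x], _, hm, _ => simp at hm; rw [hm]
        | x :: y :: t, _, _, hl => exact absurd (by simp only [List.length_cons]; omega) hl
      rw [if_neg (by simp [hl]), if_pos hm, hS]
      rw [show ([k] : List String).filter (fun x => !(x == k)) = [] by simp, pv_update_nil]
  · rw [if_neg (by simp; intro _; exact hm), if_neg hm]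

-- ---------- grouping pass facts (shared first pass) ----------

theorem pv_group_getD_nodup (conns : List (List (String × String)))
    (d : PySem.Dict String (PySem.Set String)) (h : ∀ k, (d.getD k [] : List String).Nodup) (k : String) :
    ((conns.foldl
        (fun d conn =>
          d.modify ((PySem.Dict.mk conn).getD "wire" "") []
            (fun s => s.add ((PySem.Dict.mk conn).getD "component" "")))
        d).getD k [] : List String).Nodup := by
  induction conns generalizing d with
  | nil => exact h k
  | cons conn t ih =>
    rw [List.foldl_cons]
    apply ih
    intro j
    rw [PySem.Dict.getD_modify]
    split_ifs
    · exact PySem.Set.nodup_add _ _ (h _)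
    · exact h j

theorem pv_group_values_nodup (conns : List (List (String × String))) :
    ∀ p ∈ (conns.foldl
        (fun d conn =>
          d.modify ((PySem.Dict.mk conn).getD "wire" "") []
            (fun s => PySem.Set.add s ((PySem.Dict.mk conn).getD "component" "")))
        (PySem.Dict.empty : PySem.Dict String (PySem.Set String))).items, (p.2 : List String).Nodup := by
  intro p hp
  obtain ⟨k, v⟩ := p
  have hknd : (conns.foldl
      (fun d conn =>
        d.modify ((PySem.Dict.mk conn).getD "wire" "") []
          (fun s => PySem.Set.add s ((PySem.Dict.mk conn).getD "component" "")))
      PySem.Dict.empty).keys.Nodup :=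
    PySem.Dict.nodup_keys_foldl_modify_key _ _ _ _ _ PySem.Dict.nodup_keys_empty
  have hgd := PySem.Dict.getD_of_mem_items _ hp hknd ([] : PySem.Set String)
  rw [← hgd]
  exact pv_group_getD_nodup conns PySem.Dict.empty
    (fun j => by rw [PySem.Dict.getD_empty]; exact List.nodup_nil) k

-- ---------- the main equality, stated over the grouped dict W ----------

theorem pv_main (W : PySem.Dict String (PySem.Set String)) (hW : W.keys.Nodup)
    (hv : ∀ p ∈ W.items, (p.2 : List String).Nodup) :
    (W.items.foldl
        (fun adj item =>
          (PySem.List.enumerate item.2).foldl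
            (fun adj p =>
              (PySem.List.slice item.2 (some (p.1 + 1))).foldl
                (fun adj comp2 =>
                  (adj.modify p.2 [] (fun s => PySem.Set.add s comp2)).modify comp2 [] (fun s => PySem.Set.add s p.2))
                adj)
            adj)
        (PySem.Dict.empty : PySem.Dict String (PySem.Set String))).items
    = (((W.items.foldl
          (fun d item =>
            if 1 < item.2.length then
              item.2.foldl (fun d comp => d.modify comp [] (fun l => l ++ [item.1])) d
            else d)
          (PySem.Dict.empty : PySem.Dict String (List String))).items).foldl
        (fun adj item =>
          adj.insert item.1
            (item.2.foldl
              (fun nbrs w => PySem.Set.union nbrs (PySem.Set.diff (W.getD w []) [item.1]))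
              PySem.Set.empty))
        (PySem.Dict.empty : PySem.Dict String (PySem.Set String))).items := by
  -- names
  set FA := W.items.foldl (fun adj item => pvPairRec item.2 adj)
      (PySem.Dict.empty : PySem.Dict String (PySem.Set String)) with hFA
  set CW := W.items.foldl
      (fun d item =>
        if 1 < item.2.length then
          item.2.foldl (fun d comp => d.modify comp [] (fun l => l ++ [item.1])) d
        else d)
      (PySem.Dict.empty : PySem.Dict String (List String)) with hCW
  have hAeq : (W.items.foldl
      (fun adj item =>
        (PySem.List.enumerate item.2).foldl
          (fun adj p =>
            (PySem.List.slice item.2 (some (p.1 + 1))).foldl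
              (fun adj comp2 =>
                (adj.modify p.2 [] (fun s => PySem.Set.add s comp2)).modify comp2 [] (fun s => PySem.Set.add s p.2))
              adj)
          adj)
      (PySem.Dict.empty : PySem.Dict String (PySem.Set String))) = FA := by
    rw [hFA]
    exact PySem.List.foldl_congr_mem _ _ _ _ (fun acc item _ => pv_Aloop_eq item.2 acc)
  rw [hAeq]
  -- key lists
  have hAkeys : FA.keys = W.items.foldl
      (fun ks p => if 1 < p.2.length then PySem.Set.update ks p.2 else ks) [] :=
    pv_A_keys W.items PySem.Dict.empty hv
  have hFAnd : FA.keys.Nodup := by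
    rw [hAkeys]; exact pv_keysfold_nodup _ _ List.nodup_nil
  have hCWkeys : CW.keys = W.items.foldl
      (fun ks p => if 1 < p.2.length then PySem.Set.update ks p.2 else ks) [] :=
    pv_CW_keys W.items PySem.Dict.empty
  have hCWnd : CW.keys.Nodup := by
    rw [hCWkeys]; exact pv_keysfold_nodup _ _ List.nodup_nil
  -- B's final dict: fresh distinct inserts append
  have hfresh : ∀ a ∈ CW.items,
      (PySem.Dict.empty : PySem.Dict String (PySem.Set String)).contains a.1 = false := by
    intro a _; exact PySem.Dict.contains_empty _
  have hkeysnd : (CW.items.map Prod.fst).Nodup := hCWnd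
  rw [PySem.Dict.items_foldl_insert_fresh CW.items (fun item => item.1)
    (fun item => item.2.foldl
      (fun nbrs w => PySem.Set.union nbrs (PySem.Set.diff (W.getD w []) [item.1]))
      PySem.Set.empty)
    PySem.Dict.empty hfresh hkeysnd]
  rw [show (PySem.Dict.empty : PySem.Dict String (PySem.Set String)).items = [] from rfl,
    List.nil_append]
  -- each side as a map over its (equal) key list
  rw [PySem.Dict.items_eq_map_keys FA hFAnd ([] : PySem.Set String),
    PySem.Dict.items_eq_map_keys CW hCWnd ([] : List String), List.map_map, hAkeys, hCWkeys]
  apply List.map_congr_left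
  intro k _
  simp only [Function.comp]
  congr 1
  -- value at k
  have hCWg : CW.getD k [] = pvWiresOf W.items k := by
    rw [hCW, pv_CW_getD W.items PySem.Dict.empty hv k, PySem.Dict.getD_empty, List.nil_append]
  rw [hCWg, pv_nb_eq W hW hv k, hFA, pv_A_getD W.items PySem.Dict.empty hv k,
    PySem.Dict.getD_empty]

-- ===== VERDICT (by name: the statement is the Claim_ definition above) =====
theorem build_adjacency_graph_spec : Claim_equal_build_adjacency_graph := by
  intro graph_data _ _
  show build_adjacency_graph graph_data = build_adjacency_graph_alt graph_data
  exact pv_main _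
    (PySem.Dict.nodup_keys_foldl_modify_key _ _ _ _ _ PySem.Dict.nodup_keys_empty)
    (pv_group_values_nodup ((PySem.Dict.mk graph_data).getD "connections" []))
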